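-- pv_equiv track=rewrite | github.com/abraxas0001/ANY-MEDIA-DOWNLOADER | bot.py | choose_entry
-- ===== SOURCE A (Python) =====
-- def choose_entry(entries):
--     # Prefer mp4 / video entries if available, otherwise first
--     if not entries:
--         return None
--     for ext in ('mp4', 'mkv', 'webm', 'mp3', 'm4a'):
--         for e in entries:
--             if e.get('extension') and e.get('extension').lower().startswith(ext):
--                 return e
--     return entries[0]
-- ===== SOURCE B (Python) =====
-- def choose_entry(entries):
--     # One pass keeping the best entry seen so far and its priority rank;
--     # strict < keeps the earliest entry at each priority, default entries[0].
--     if not entries: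
--         return None
--     best = entries[0]
--     best_rank = 5  # len of priority table = "no match"
--     for e in entries:
--         ext = e.get('extension')
--         if not ext:
--             continue
--         low = ext.lower()
--         r = 0
--         for p in ('mp4', 'mkv', 'webm', 'mp3', 'm4a'):
--             if low.startswith(p):
--                 break
--             r += 1
--         if r < best_rank:
--             best, best_rank = e, r
--     return best
-- ===== Notes on version B (the rewrite author's own statement) =====
-- stated objective: alternative
-- what changed: A scans the whole entry list once per preferred extension (up to five passes, early return on first hit); B makes a single pass keeping a running (best_entry, best_rank) accumulator, ranking each entry by the index of the first matching priority prefix, with strict < giving the same earliest-entry tie-break and entries[0] when nothing matches.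
import Mathlib
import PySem

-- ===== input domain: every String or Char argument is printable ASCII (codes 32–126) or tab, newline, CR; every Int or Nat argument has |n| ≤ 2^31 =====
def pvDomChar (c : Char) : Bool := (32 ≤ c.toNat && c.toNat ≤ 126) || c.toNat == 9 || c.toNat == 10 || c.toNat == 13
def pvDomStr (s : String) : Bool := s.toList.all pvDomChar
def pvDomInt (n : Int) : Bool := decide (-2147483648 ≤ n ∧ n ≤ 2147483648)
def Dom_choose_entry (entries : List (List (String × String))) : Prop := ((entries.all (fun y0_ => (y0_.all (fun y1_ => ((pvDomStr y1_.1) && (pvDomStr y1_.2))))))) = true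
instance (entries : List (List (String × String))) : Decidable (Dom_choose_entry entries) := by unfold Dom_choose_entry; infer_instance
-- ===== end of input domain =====

-- B replaces A's five passes (one per preferred extension) by a single pass keeping a
-- running (best entry, best rank) accumulator; same return value everywhere (alternative).

-- ===== PORT A =====
def pvPrefixes : List String := ["mp4", "mkv", "webm", "mp3", "m4a"]

-- e.get('extension')
def pvExt (e : List (String × String)) : Option String :=
  (PySem.Dict.mk e).get? "extension"

-- the loop body's test: e.get('extension') and e.get('extension').lower().startswith(ext)
def pvCondA (p : String) (e : List (String × String)) : Bool :=
  match pvExt e with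
  | none => false
  | some ext => !(ext == "") && PySem.Str.startswith (PySem.Str.lower ext) p

def choose_entry (entries : List (List (String × String))) : Option (List (String × String)) :=
  match entries with
  | [] => none
  | e0 :: _ =>
    match pvPrefixes.findSome? (fun p => entries.find? (pvCondA p)) with
    | some e => some e
    | none => some e0

-- ===== PORT B =====
-- e.get('extension') read off the association list directly (first matching key), '' for a miss
def altExt (e : List (String × String)) : String :=
  match e.find? (fun kv => kv.1 == "extension") with
  | none => ""
  | some kv => kv.2

-- the inner for/break loop: r counts leading priority prefixes that do NOT match
def altRank (low : String) : List String → Nat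
  | [] => 0
  | p :: ps => if PySem.Str.startswith low p then 0 else altRank low ps + 1

-- the main for loop over entries with the (best, best_rank) accumulator
def altLoop : List (List (String × String)) → List (String × String) → Nat → List (String × String)
  | [], best, _ => best
  | e :: rest, best, bestRank =>
    let ext := altExt e
    if ext == "" then
      altLoop rest best bestRank
    else
      let r := altRank (PySem.Str.lower ext) ["mp4", "mkv", "webm", "mp3", "m4a"]
      if r < bestRank then altLoop rest e r else altLoop rest best bestRank

def choose_entry_alt (entries : List (List (String × String))) : Option (List (String × String)) :=
  match entries with
  | [] => none
  | e0 :: rest => some (altLoop (e0 :: rest) e0 5)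

-- ===== PRECONDITION & SPEC =====
def Spec_choose_entry (entries : List (List (String × String))) (out : Option (List (String × String))) : Prop := out = choose_entry_alt entries
instance (entries : List (List (String × String))) (out : Option (List (String × String))) : Decidable (Spec_choose_entry entries out) := by unfold Spec_choose_entry; infer_instance

-- ===== CLAIM (what is proved, stated in full; the proofs are below) =====
def Claim_equal_choose_entry : Prop := ∀ (entries : List (List (String × String))), Dom_choose_entry entries → Spec_choose_entry entries (choose_entry entries)

-- ===== LEMMAS AND PROOFS =====

-- proof-side priority rank of an entry (5 = no preferred extension)
def pvRank (e : List (String × String)) : Nat :=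
  match pvExt e with
  | none => 5
  | some ext => if ext == "" then 5 else altRank (PySem.Str.lower ext) pvPrefixes

theorem altRank_le (low : String) (l : List String) : altRank low l ≤ l.length := by
  induction l with
  | nil => simp [altRank]
  | cons p ps ih => simp only [altRank]; split_ifs <;> simp <;> omega

theorem pvRank_le (e : List (String × String)) : pvRank e ≤ 5 := by
  cases hx : pvExt e with
  | none => simp [pvRank, hx]
  | some ext =>
    simp only [pvRank, hx]
    split_ifs
    · exact le_refl 5
    · exact altRank_le _ pvPrefixes

-- the Dict lookup of A's port and the find? lookup of B's port agree
theorem altExt_eq (e : List (String × String)) : altExt e = (pvExt e).getD "" := by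
  unfold altExt pvExt
  induction e with
  | nil => rfl
  | cons kv rest ih =>
    rw [show (kv :: rest) = ((kv.1, kv.2) :: rest) from rfl, PySem.Dict.get?_mk_cons]
    by_cases h : kv.1 == "extension"
    · simp [List.find?_cons, h]
    · simp only [List.find?_cons, h, if_neg]
      simpa using ih

-- two prefixes of the same string are comparable; used for exclusivity of the priority tests
theorem pvExcl2 (s p q : String) (hp : PySem.Str.startswith s p = true)
    (hq : PySem.Str.startswith s q = true) (h1 : ¬ p.toList <+: q.toList)
    (h2 : ¬ q.toList <+: p.toList) : False := by
  simp only [PySem.Str.startswith_eq] at hp hq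
  rw [PySem.Chars.startswith_iff] at hp hq
  rcases le_total p.toList.length q.toList.length with h | h
  · exact h1 (List.prefix_of_prefix_length_le hp hq h)
  · exact h2 (List.prefix_of_prefix_length_le hq hp h)

-- A's test at priority i holds iff the rank is exactly i (priorities are mutually exclusive)
theorem altRank_cons (low p : String) (ps : List String) :
    altRank low (p :: ps) = if PySem.Str.startswith low p then 0 else altRank low ps + 1 := rfl

theorem pvCond_iff_rank (i : Nat) (hi : i < 5) (e : List (String × String)) :
    pvCondA (pvPrefixes.getD i "") e = true ↔ pvRank e = i := by
  unfold pvCondA pvRank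
  cases hx : pvExt e with
  | none =>
    constructor
    · intro h; cases h
    · intro h; simp at h; omega
  | some ext =>
    by_cases he : ext == ""
    · simp only [he, Bool.not_true, Bool.false_and, if_true]
      constructor
      · intro h; cases h
      · intro h; simp at h; omega
    · simp only [he, Bool.not_false, Bool.true_and, Bool.false_eq_true, if_false]
      generalize PySem.Str.lower ext = low
      have E : ∀ p q : String, PySem.Str.startswith low p = true →
          PySem.Str.startswith low q = true → ¬ p.toList <+: q.toList →
          ¬ q.toList <+: p.toList → False := fun p q => pvExcl2 low p q
      have e01 := fun a b => E "mp4" "mkv" a b (by decide) (by decide)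
      have e02 := fun a b => E "mp4" "webm" a b (by decide) (by decide)
      have e03 := fun a b => E "mp4" "mp3" a b (by decide) (by decide)
      have e04 := fun a b => E "mp4" "m4a" a b (by decide) (by decide)
      have e12 := fun a b => E "mkv" "webm" a b (by decide) (by decide)
      have e13 := fun a b => E "mkv" "mp3" a b (by decide) (by decide)
      have e14 := fun a b => E "mkv" "m4a" a b (by decide) (by decide)
      have e23 := fun a b => E "webm" "mp3" a b (by decide) (by decide)
      have e24 := fun a b => E "webm" "m4a" a b (by decide) (by decide)
      have e34 := fun a b => E "mp3" "m4a" a b (by decide) (by decide)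
      clear E
      simp only [pvPrefixes, altRank_cons]
      interval_cases i <;> simp only [List.getD_cons_zero, List.getD_cons_succ] <;> constructor
      -- i = 0
      · intro h; rw [if_pos h]
      · intro h
        cases h0 : PySem.Str.startswith low "mp4" with
        | true => rfl
        | false => rw [if_neg (by simp only [h0]; decide)] at h; omega
      -- i = 1
      · intro h
        have n0 : PySem.Str.startswith low "mp4" = false := by
          cases h0 : PySem.Str.startswith low "mp4" with
          | false => rfl
          | true => exact (e01 h0 h).elim
        rw [if_neg (by simp only [n0]; decide), if_pos h]
      · intro h
        cases h0 : PySem.Str.startswith low "mp4" with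
        | true => rw [if_pos h0] at h; omega
        | false =>
          rw [if_neg (by simp only [h0]; decide)] at h
          cases h1 : PySem.Str.startswith low "mkv" with
          | true => rfl
          | false => rw [if_neg (by simp only [h1]; decide)] at h; omega
      -- i = 2
      · intro h
        have n0 : PySem.Str.startswith low "mp4" = false := by
          cases h0 : PySem.Str.startswith low "mp4" with
          | false => rfl
          | true => exact (e02 h0 h).elim
        have n1 : PySem.Str.startswith low "mkv" = false := by
          cases h1 : PySem.Str.startswith low "mkv" with
          | false => rfl
          | true => exact (e12 h1 h).elim
        rw [if_neg (by simp only [n0]; decide), if_neg (by simp only [n1]; decide), if_pos h]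
      · intro h
        cases h0 : PySem.Str.startswith low "mp4" with
        | true => rw [if_pos h0] at h; omega
        | false =>
          rw [if_neg (by simp only [h0]; decide)] at h
          cases h1 : PySem.Str.startswith low "mkv" with
          | true => rw [if_pos h1] at h; omega
          | false =>
            rw [if_neg (by simp only [h1]; decide)] at h
            cases h2 : PySem.Str.startswith low "webm" with
            | true => rfl
            | false => rw [if_neg (by simp only [h2]; decide)] at h; omega
      -- i = 3
      · intro h
        have n0 : PySem.Str.startswith low "mp4" = false := by
          cases h0 : PySem.Str.startswith low "mp4" with
          | false => rfl
          | true => exact (e03 h0 h).elim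
        have n1 : PySem.Str.startswith low "mkv" = false := by
          cases h1 : PySem.Str.startswith low "mkv" with
          | false => rfl
          | true => exact (e13 h1 h).elim
        have n2 : PySem.Str.startswith low "webm" = false := by
          cases h2 : PySem.Str.startswith low "webm" with
          | false => rfl
          | true => exact (e23 h2 h).elim
        rw [if_neg (by simp only [n0]; decide), if_neg (by simp only [n1]; decide), if_neg (by simp only [n2]; decide), if_pos h]
      · intro h
        cases h0 : PySem.Str.startswith low "mp4" with
        | true => rw [if_pos h0] at h; omega
        | false =>
          rw [if_neg (by simp only [h0]; decide)] at h
          cases h1 : PySem.Str.startswith low "mkv" with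
          | true => rw [if_pos h1] at h; omega
          | false =>
            rw [if_neg (by simp only [h1]; decide)] at h
            cases h2 : PySem.Str.startswith low "webm" with
            | true => rw [if_pos h2] at h; omega
            | false =>
              rw [if_neg (by simp only [h2]; decide)] at h
              cases h3 : PySem.Str.startswith low "mp3" with
              | true => rfl
              | false => rw [if_neg (by simp only [h3]; decide)] at h; omega
      -- i = 4
      · intro h
        have n0 : PySem.Str.startswith low "mp4" = false := by
          cases h0 : PySem.Str.startswith low "mp4" with
          | false => rfl
          | true => exact (e04 h0 h).elim
        have n1 : PySem.Str.startswith low "mkv" = false := by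
          cases h1 : PySem.Str.startswith low "mkv" with
          | false => rfl
          | true => exact (e14 h1 h).elim
        have n2 : PySem.Str.startswith low "webm" = false := by
          cases h2 : PySem.Str.startswith low "webm" with
          | false => rfl
          | true => exact (e24 h2 h).elim
        have n3 : PySem.Str.startswith low "mp3" = false := by
          cases h3 : PySem.Str.startswith low "mp3" with
          | false => rfl
          | true => exact (e34 h3 h).elim
        rw [if_neg (by simp only [n0]; decide), if_neg (by simp only [n1]; decide), if_neg (by simp only [n2]; decide),
            if_neg (by simp only [n3]; decide), if_pos h]
      · intro h
        cases h0 : PySem.Str.startswith low "mp4" with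
        | true => rw [if_pos h0] at h; omega
        | false =>
          rw [if_neg (by simp only [h0]; decide)] at h
          cases h1 : PySem.Str.startswith low "mkv" with
          | true => rw [if_pos h1] at h; omega
          | false =>
            rw [if_neg (by simp only [h1]; decide)] at h
            cases h2 : PySem.Str.startswith low "webm" with
            | true => rw [if_pos h2] at h; omega
            | false =>
              rw [if_neg (by simp only [h2]; decide)] at h
              cases h3 : PySem.Str.startswith low "mp3" with
              | true => rw [if_pos h3] at h; omega
              | false =>
                rw [if_neg (by simp only [h3]; decide)] at h
                cases h4 : PySem.Str.startswith low "m4a" with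
                | true => rfl
                | false => rw [if_neg (by simp only [h4]; decide)] at h; omega

-- proof-side reference: the first element of minimal pvRank
def pvFam : List (List (String × String)) → Option (List (String × String))
  | [] => none
  | x :: xs =>
    match pvFam xs with
    | none => some x
    | some y => if pvRank y < pvRank x then some y else some x

-- minimum rank over a list (5 acts as top since every rank is ≤ 5)
def pvMinR (es : List (List (String × String))) : Nat :=
  es.foldr (fun e a => min (pvRank e) a) 5

theorem pvMinR_le (es : List (List (String × String))) (e : List (String × String))
    (h : e ∈ es) : pvMinR es ≤ pvRank e := by
  induction es with
  | nil => cases h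
  | cons x xs ih =>
    rcases List.mem_cons.mp h with rfl | h'
    · exact le_trans (Nat.min_le_left _ _) le_rfl
    · exact le_trans (Nat.min_le_right _ _) (ih h')

theorem pvMinR_attained (es : List (List (String × String))) (hne : es ≠ []) :
    ∃ e ∈ es, pvRank e = pvMinR es := by
  induction es with
  | nil => exact absurd rfl hne
  | cons x xs ih =>
    by_cases hx : xs = []
    · subst hx
      refine ⟨x, List.mem_cons_self, ?_⟩
      show pvRank x = min (pvRank x) 5
      have := pvRank_le x; omega
    · obtain ⟨e, he, hre⟩ := ih hx
      by_cases h : pvRank x ≤ pvMinR xs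
      · exact ⟨x, List.mem_cons_self, by show pvRank x = min (pvRank x) (pvMinR xs); omega⟩
      · exact ⟨e, List.mem_cons_of_mem _ he, by show pvRank e = min (pvRank x) (pvMinR xs); omega⟩

theorem pvFam_eq_find (es : List (List (String × String))) :
    pvFam es = es.find? (fun e => pvRank e == pvMinR es) := by
  induction es with
  | nil => rfl
  | cons x xs ih =>
    cases hxs : xs with
    | nil =>
      have hle := pvRank_le x
      simp [pvFam, pvMinR, List.find?, Nat.min_eq_left hle]
    | cons z zs =>
      rw [← hxs]
      have hfam : (pvFam xs).isSome := by
        rw [hxs]; unfold pvFam; cases pvFam zs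
        · rfl
        · show (if pvRank _ < pvRank z then some _ else some z).isSome = true
          split_ifs <;> rfl
      obtain ⟨y, hy⟩ := Option.isSome_iff_exists.mp hfam
      have hry : pvRank y = pvMinR xs := by
        have h1 : xs.find? (fun e => pvRank e == pvMinR xs) = some y := ih ▸ hy
        simpa using List.find?_some h1
      have hmin : pvMinR (x :: xs) = min (pvRank x) (pvMinR xs) := rfl
      by_cases h : pvRank x ≤ pvMinR xs
      · have hmx : pvMinR (x :: xs) = pvRank x := by omega
        rw [List.find?_cons_of_pos (by simp [hmx])]
        simp only [pvFam, hy]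
        rw [if_neg (by omega)]
      · have hmx : pvMinR (x :: xs) = pvMinR xs := by omega
        rw [List.find?_cons_of_neg (by simp [hmx]; omega)]
        simp only [pvFam, hy]
        rw [if_pos (by omega), hmx, ← ih, hy]

-- skip branch of B's loop ⇔ rank 5 by definition of pvRank
theorem pvSkip_rank (e : List (String × String)) (h : altExt e = "") : pvRank e = 5 := by
  rw [altExt_eq] at h
  unfold pvRank
  cases hx : pvExt e with
  | none => rfl
  | some ext => rw [hx] at h; simp at h; simp [h]

theorem pvTake_rank (e : List (String × String)) (h : ¬ altExt e = "") :
    altRank (PySem.Str.lower (altExt e)) ["mp4", "mkv", "webm", "mp3", "m4a"] = pvRank e := by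
  rw [altExt_eq] at *
  unfold pvRank
  cases hx : pvExt e with
  | none => rw [hx] at h; simp at h
  | some ext =>
    rw [hx] at h; simp at h ⊢
    rw [if_neg (by simpa using h)]
    rfl

-- invariant of B's running-minimum loop
theorem pvLoop (xs : List (List (String × String))) :
    ∀ (best : List (String × String)) (brank : Nat), brank ≤ 5 →
    altLoop xs best brank =
      match pvFam xs with
      | none => best
      | some y => if pvRank y < brank then y else best := by
  induction xs with
  | nil => intro best brank _; rfl
  | cons e rest ih =>
    intro best brank hbr
    show (if altExt e == "" then altLoop rest best brank
          else if altRank (PySem.Str.lower (altExt e)) ["mp4", "mkv", "webm", "mp3", "m4a"] < brank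
               then altLoop rest e (altRank (PySem.Str.lower (altExt e)) ["mp4", "mkv", "webm", "mp3", "m4a"])
               else altLoop rest best brank) = _
    by_cases hsk : altExt e = ""
    · have hre : pvRank e = 5 := pvSkip_rank e hsk
      rw [if_pos (by simpa using hsk), ih best brank hbr]
      cases hf : pvFam rest with
      | none => simp [pvFam, hf, hre]; omega
      | some y =>
        have hy5 := pvRank_le y
        by_cases hy : pvRank y < 5
        · simp [pvFam, hf, hre, hy]
        · have hy5' : pvRank y = 5 := by omega
          have h5 : ¬ (5 : Nat) < brank := by omega
          simp [pvFam, hf, hre, hy5', h5]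
    · rw [if_neg (by simpa using hsk), pvTake_rank e hsk]
      by_cases htk : pvRank e < brank
      · rw [if_pos htk, ih e (pvRank e) (pvRank_le e)]
        cases hf : pvFam rest with
        | none => simp [pvFam, hf, htk]
        | some y =>
          by_cases hy : pvRank y < pvRank e
          · have h1 : pvRank y < brank := by omega
            simp [pvFam, hf, hy, h1]
          · have h1 : ¬ pvRank y < pvRank e := hy
            simp [pvFam, hf, h1, htk]
      · rw [if_neg htk, ih best brank hbr]
        cases hf : pvFam rest with
        | none => simp [pvFam, hf]; omega
        | some y =>
          by_cases hy : pvRank y < pvRank e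
          · simp [pvFam, hf, hy]
          · have h2 : ¬ pvRank e < brank := htk
            have h3 : ¬ pvRank y < brank := by omega
            simp [pvFam, hf, hy, h2, h3]

theorem pvAlt_eq_fam (e0 : List (String × String)) (t : List (List (String × String))) :
    choose_entry_alt (e0 :: t) = pvFam (e0 :: t) := by
  show some (altLoop (e0 :: t) e0 5) = _
  rw [pvLoop (e0 :: t) e0 5 le_rfl]
  cases hf : pvFam (e0 :: t) with
  | none =>
    rw [pvFam_eq_find] at hf
    obtain ⟨w, hw, hrw⟩ := pvMinR_attained (e0 :: t) (by simp)
    exact absurd (List.find?_eq_none.mp hf w hw) (by simp [hrw])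
  | some z =>
    by_cases hz : pvRank z < 5
    · simp [hz]
    · have hz5 : pvRank z = 5 := by have := pvRank_le z; omega
      have hmz : pvRank z = pvMinR (e0 :: t) := by
        rw [pvFam_eq_find] at hf
        simpa using List.find?_some hf
      have hre0 : pvRank e0 = 5 := by
        have h1 := pvMinR_le (e0 :: t) e0 List.mem_cons_self
        have h2 := pvRank_le e0; omega
      have heq : pvFam (e0 :: t) = some e0 := by
        rw [pvFam_eq_find]
        exact List.find?_cons_of_pos (by simp [hre0, ← hmz, hz5])
      rw [hf] at heq
      injection heq with h
      simp [hz, h]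

theorem pvA_eq_find (e0 : List (String × String)) (t : List (List (String × String))) :
    choose_entry (e0 :: t) = (e0 :: t).find? (fun e => pvRank e == pvMinR (e0 :: t)) := by
  have hc : ∀ i : Nat, i < 5 → (e0 :: t).find? (pvCondA (pvPrefixes.getD i "")) =
      (e0 :: t).find? (fun e => pvRank e == i) := by
    intro i hi
    congr 1; funext e
    rw [Bool.eq_iff_iff, pvCond_iff_rank i hi e, beq_iff_eq]
  have h0 := hc 0 (by omega); have h1 := hc 1 (by omega); have h2 := hc 2 (by omega)
  have h3 := hc 3 (by omega); have h4 := hc 4 (by omega)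
  simp only [pvPrefixes, List.getD_cons_zero, List.getD_cons_succ] at h0 h1 h2 h3 h4
  have hA : choose_entry (e0 :: t) =
      match (e0 :: t).find? (fun e => pvRank e == 0) with
      | some e => some e
      | none => match (e0 :: t).find? (fun e => pvRank e == 1) with
        | some e => some e
        | none => match (e0 :: t).find? (fun e => pvRank e == 2) with
          | some e => some e
          | none => match (e0 :: t).find? (fun e => pvRank e == 3) with
            | some e => some e
            | none => match (e0 :: t).find? (fun e => pvRank e == 4) with
              | some e => some e
              | none => some e0 := by
    show (match pvPrefixes.findSome? (fun p => (e0 :: t).find? (pvCondA p)) with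
          | some e => some e
          | none => some e0) = _
    simp only [pvPrefixes, List.findSome?_cons, List.findSome?_nil]
    rw [h0, h1, h2, h3, h4]
    cases (e0 :: t).find? (fun e => pvRank e == 0) <;>
    cases (e0 :: t).find? (fun e => pvRank e == 1) <;>
    cases (e0 :: t).find? (fun e => pvRank e == 2) <;>
    cases (e0 :: t).find? (fun e => pvRank e == 3) <;>
    cases (e0 :: t).find? (fun e => pvRank e == 4) <;> rfl
  rw [hA]
  have hnone : ∀ i : Nat, i < pvMinR (e0 :: t) →
      (e0 :: t).find? (fun e => pvRank e == i) = none := by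
    intro i hi
    apply List.find?_eq_none.mpr
    intro e he
    have := pvMinR_le (e0 :: t) e he
    simp; omega
  have hm5 : pvMinR (e0 :: t) ≤ 5 :=
    le_trans (pvMinR_le (e0 :: t) e0 List.mem_cons_self) (pvRank_le e0)
  obtain ⟨w, hw, hrw⟩ := pvMinR_attained (e0 :: t) (by simp)
  rcases (show pvMinR (e0 :: t) = 0 ∨ pvMinR (e0 :: t) = 1 ∨ pvMinR (e0 :: t) = 2 ∨
      pvMinR (e0 :: t) = 3 ∨ pvMinR (e0 :: t) = 4 ∨ pvMinR (e0 :: t) = 5 by omega)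
      with h|h|h|h|h|h <;> rw [h] <;>
    [skip; rw [hnone 0 (by omega)]; rw [hnone 0 (by omega), hnone 1 (by omega)];
     rw [hnone 0 (by omega), hnone 1 (by omega), hnone 2 (by omega)];
     rw [hnone 0 (by omega), hnone 1 (by omega), hnone 2 (by omega), hnone 3 (by omega)];
     rw [hnone 0 (by omega), hnone 1 (by omega), hnone 2 (by omega), hnone 3 (by omega),
         hnone 4 (by omega)]]
  case _ | _ | _ | _ | _ =>
    rw [h] at hrw
    cases hfind : (e0 :: t).find? (fun e => pvRank e == pvMinR (e0 :: t)) with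
    | none => exact absurd (List.find?_eq_none.mp (h ▸ hfind) w hw) (by simp [hrw])
    | some v => rw [h] at hfind; rw [hfind]
  case _ =>
    have hre0 : pvRank e0 = 5 := by
      have := pvMinR_le (e0 :: t) e0 List.mem_cons_self
      have := pvRank_le e0; omega
    rw [List.find?_cons_of_pos (by simp [hre0])]

-- ===== VERDICT (by name: the statement is the Claim_ definition above) =====
theorem choose_entry_spec : Claim_equal_choose_entry := by
  intro entries _
  unfold Spec_choose_entry
  match entries with
  | [] => rfl
  | e0 :: t => rw [pvA_eq_find, pvAlt_eq_fam, pvFam_eq_find]
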